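-- pv_equiv track=rewrite | github.com/pikalaw/algorithm | traveling_saleman_for_profit.py | max_profit_route
-- ===== SOURCE A (Python) =====
-- from collections import defaultdict
-- from typing import List, Dict
--
-- Matrix = List[List[int]]
--
-- def is_square_matrix(m: Matrix):
--   num_row = len(m)
--   for row_index, row in enumerate(m):
--     if len(row) != num_row:
--       return False
--   return True
--
-- class GainPath(object):
--   def __init__(self, city=None, gain=None):
--     self.next_city = city
--     self.gain = gain
--
--   def __repr__(self):
--     return '(next:{} gain:{})'.format(self.next_city, self.gain)
--
-- def construct_path(gain_paths: Dict[int, Dict[int, GainPath]], start_city: int):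
--   path = [start_city]
--   time = 0
--   current_city = start_city
--   assert len(gain_paths) > 0
--   while time + 1 < len(gain_paths[0]):
--     next_city = gain_paths[current_city][time].next_city
--     path.append(next_city)
--     current_city = next_city
--     time += 1
--   return path
--
-- def max_profit_route(revenue: Matrix, travel_cost: Matrix):
--   assert len(revenue) == len(travel_cost)
--   assert is_square_matrix(travel_cost)
--   assert len(revenue) > 0
--
--   num_times = len(revenue[0])
--   num_cities = len(revenue)
--
--   gain_paths = defaultdict(lambda: defaultdict(GainPath))
--
--   # First round of dynamic programming..
--   for c in range(num_cities):
--     gain_paths[c][num_times - 1] = GainPath(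
--         city=None, gain=revenue[c][num_times - 1])
--
--   for t in range(num_times - 2, -1, -1):
--     for c in range(num_cities):
--       gain = -99
--       for d in range(num_cities):
--         this_gain = revenue[c][t] + gain_paths[d][t+1].gain - travel_cost[c][d]
--         if this_gain > gain:
--           gain_paths[c][t] = GainPath(city=d, gain=this_gain)
--           gain = this_gain
--
--   # Construct the path.
--   i = 0
--   for j in range(i+1, len(gain_paths)):
--     if gain_paths[j][0].gain > gain_paths[i][0].gain:
--       i = j
--   return gain_paths[i][0].gain, construct_path(gain_paths, i)
-- ===== SOURCE B (Python) =====
-- def max_profit_route(revenue, travel_cost):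
--     assert len(revenue) == len(travel_cost)
--     assert all(len(row) == len(travel_cost) for row in travel_cost)
--     assert len(revenue) > 0
--
--     num_times = len(revenue[0])
--     num_cities = len(revenue)
--
--     memo = {}
--
--     def best(c, t):
--         """Best (gain, next_city) starting at city c at time t, memoized."""
--         if (c, t) in memo:
--             return memo[(c, t)]
--         if t == num_times - 1:
--             res = (revenue[c][t], None)
--         else:
--             bg, bn = -99, None
--             for d in range(num_cities):
--                 g = revenue[c][t] + best(d, t + 1)[0] - travel_cost[c][d]
--                 if g > bg:
--                     bg, bn = g, d
--             res = (bg, bn)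
--         memo[(c, t)] = res
--         return res
--
--     start = 0
--     for c in range(1, num_cities):
--         if best(c, 0)[0] > best(start, 0)[0]:
--             start = c
--
--     path = [start]
--     cur, t = start, 0
--     while t + 1 < num_times:
--         cur = best(cur, t)[1]
--         path.append(cur)
--         t += 1
--     return best(start, 0)[0], path
-- ===== Notes on version B (the rewrite author's own statement) =====
-- stated objective: alternative
-- what changed: B replaces A's iterative backward table-filling over a defaultdict-of-defaultdicts by a top-down memoized recursion best(c,t) -> (gain, next_city) evaluated on demand from the start-city argmax, with the path then reconstructed by following next_city pointers forward.
-- outside the precondition, e.g. on max_profit_route([[0, 0]], [[200]]): A returns (None, [0, None]), B returns (-99, [0, None])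
import Mathlib
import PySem

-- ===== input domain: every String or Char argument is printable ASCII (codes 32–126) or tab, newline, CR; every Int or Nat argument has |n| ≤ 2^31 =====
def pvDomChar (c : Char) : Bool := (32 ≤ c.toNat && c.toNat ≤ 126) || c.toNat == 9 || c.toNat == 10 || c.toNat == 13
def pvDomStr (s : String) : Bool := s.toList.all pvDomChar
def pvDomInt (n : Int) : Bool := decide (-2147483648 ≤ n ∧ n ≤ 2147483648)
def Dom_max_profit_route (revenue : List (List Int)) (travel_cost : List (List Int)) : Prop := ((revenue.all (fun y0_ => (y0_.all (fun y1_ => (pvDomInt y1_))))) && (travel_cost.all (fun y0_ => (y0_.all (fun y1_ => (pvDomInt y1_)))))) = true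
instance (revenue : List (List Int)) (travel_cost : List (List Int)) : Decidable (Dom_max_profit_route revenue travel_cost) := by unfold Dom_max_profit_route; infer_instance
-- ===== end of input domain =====

-- B replaces A's iterative backward table-filling over a defaultdict-of-defaultdicts by a
-- top-down memoized recursion best(c,t) -> (gain, next_city) evaluated on demand from the
-- start-city argmax, with the path reconstructed by following next_city pointers forward
-- (alternative decomposition, same asymptotic cost).


-- Python m[i][j] for the 0 ≤ i, j in range guaranteed by Pre_ (Python raises IndexError outside)
def pvGet2 (m : List (List Int)) (i j : Nat) : Int := (m.getD i []).getD j 0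

-- ===== PORT A =====
-- inner 'for d in range(num_cities)' of A; state = (gain, gain_paths[c][t] as (next_city, gain));
-- 'gain_paths[d][t+1].gain' on an unset cell is None in Python (TypeError in the sum, excluded
-- by Pre_), ported as '.getD 0'
def pvStepA (revenue travel_cost : List (List Int)) (nxt : List (Option Int × Option Int))
    (t c : Nat) (st : Int × (Option Int × Option Int)) (d : Nat) : Int × (Option Int × Option Int) :=
  let thisGain := pvGet2 revenue c t + ((nxt.getD d ((none : Option Int), (none : Option Int))).2.getD 0)
                  - pvGet2 travel_cost c d
  if thisGain > st.1 then (thisGain, (some (d : Int), some thisGain)) else st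

def pvInnerA (revenue travel_cost : List (List Int)) (nxt : List (Option Int × Option Int))
    (t c : Nat) : Int × (Option Int × Option Int) :=
  (List.range revenue.length).foldl (pvStepA revenue travel_cost nxt t c) (-99, (none, none))

-- gain_paths row at time num_times-1-k (k = 0 is the first DP round); defaultdict cell = (None, None)
def pvRowsA (revenue travel_cost : List (List Int)) : Nat → List (Option Int × Option Int)
  | 0 => (List.range revenue.length).map
      (fun c => ((none : Option Int), some (pvGet2 revenue c ((revenue.headD []).length - 1))))
  | k+1 => (List.range revenue.length).map
      (fun c => (pvInnerA revenue travel_cost (pvRowsA revenue travel_cost k)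
                  ((revenue.headD []).length - 1 - (k+1)) c).2)

-- construct_path's while loop; under Pre_, len(gain_paths[0]) = num_times so it runs T-1 steps
-- (fuel); a None next_city (unset cell, excluded by Pre_) is ported as '.getD 0' / '.toNat'
def pvWalkA (revenue travel_cost : List (List Int)) (T : Nat) (cur : Int) (t fuel : Nat) : List Int :=
  match fuel with
  | 0 => []
  | f+1 =>
    let nx := ((pvRowsA revenue travel_cost (T - 1 - t)).getD cur.toNat ((none : Option Int), (none : Option Int))).1.getD 0
    nx :: pvWalkA revenue travel_cost T nx (t+1) f

-- the three asserts raise AssertionError on violation; Pre_ excludes those inputs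
def max_profit_route (revenue : List (List Int)) (travel_cost : List (List Int)) : Int × List Int :=
  let T := (revenue.headD []).length     -- num_times = len(revenue[0])
  let n := revenue.length                -- num_cities; = len(gain_paths) after the first round
  let row0 := pvRowsA revenue travel_cost (T - 1)   -- gain_paths[·][0]
  let i := (PySem.List.pyRange 1 (n : Int) 1).foldl
    (fun i j =>
      if ((row0.getD j.toNat ((none : Option Int), (none : Option Int))).2.getD 0)
         > ((row0.getD i.toNat ((none : Option Int), (none : Option Int))).2.getD 0)
      then j else i) (0 : Int)
  (((row0.getD i.toNat ((none : Option Int), (none : Option Int))).2.getD 0),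
    i :: pvWalkA revenue travel_cost T i 0 (T - 1))

-- ===== PORT B =====
-- Source B's memoized recursion best(c, t), parametrized by k = num_times-1-t (the recursion
-- best(c,t) -> best(d,t+1) becomes structural recursion on k); the memo dict is keyed by the
-- Python key (c, t) and threaded through every call: memo hit, base case t == num_times-1,
-- or the 'for d in range(num_cities)' scan carrying (best-so-far, memo) as a fold
def pvBestMemoB (revenue travel_cost : List (List Int)) (n T : Nat) :
    Nat → Int → PySem.Dict (Int × Int) (Int × Option Int) →
    (Int × Option Int) × PySem.Dict (Int × Int) (Int × Option Int)
  | k, c, memo =>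
    match memo.get? (c, (T : Int) - 1 - (k : Int)) with
    | some v => (v, memo)
    | none =>
      match k with
      | 0 =>
        let res : Int × Option Int := (pvGet2 revenue c.toNat (T - 1), none)
        (res, memo.insert (c, (T : Int) - 1 - ((0 : Nat) : Int)) res)
      | k'+1 =>
        let r := (List.range n).foldl
          (fun (acc : (Int × Option Int) × PySem.Dict (Int × Int) (Int × Option Int)) (d : Nat) =>
            let s := pvBestMemoB revenue travel_cost n T k' (d : Int) acc.2
            let g := pvGet2 revenue c.toNat (T - 1 - (k' + 1)) + s.1.1
                     - pvGet2 travel_cost c.toNat d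
            if g > acc.1.1 then ((g, some (d : Int)), s.2) else (acc.1, s.2))
          (((-99 : Int), (none : Option Int)), memo)
        (r.1, r.2.insert (c, (T : Int) - 1 - ((k'+1 : Nat) : Int)) r.1)

-- Source B's final while loop: follow next_city pointers forward, threading the memo; a None
-- next_city (excluded by Pre_) is ported as '.getD 0'
def pvWalkB (revenue travel_cost : List (List Int)) (n T : Nat) :
    Nat → Nat → Int → PySem.Dict (Int × Int) (Int × Option Int) →
    List Int × PySem.Dict (Int × Int) (Int × Option Int)
  | 0, _, _, memo => ([], memo)
  | f+1, t, cur, memo =>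
    let r := pvBestMemoB revenue travel_cost n T (T - 1 - t) cur memo
    let nx := r.1.2.getD 0
    let rest := pvWalkB revenue travel_cost n T f (t + 1) nx r.2
    (nx :: rest.1, rest.2)

def max_profit_route_alt (revenue : List (List Int)) (travel_cost : List (List Int)) : Int × List Int :=
  let T := (revenue.headD []).length
  let n := revenue.length
  -- 'for c in range(1, num_cities): if best(c,0)[0] > best(start,0)[0]: start = c'
  let sel := (PySem.List.pyRange 1 (n : Int) 1).foldl
    (fun (acc : Int × PySem.Dict (Int × Int) (Int × Option Int)) c =>
      let rc := pvBestMemoB revenue travel_cost n T (T - 1) c acc.2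
      let rs := pvBestMemoB revenue travel_cost n T (T - 1) acc.1 rc.2
      if rc.1.1 > rs.1.1 then (c, rs.2) else (acc.1, rs.2))
    ((0 : Int), PySem.Dict.empty)
  let w := pvWalkB revenue travel_cost n T (T - 1) 0 sel.1 sel.2
  let rfin := pvBestMemoB revenue travel_cost n T (T - 1) sel.1 w.2
  (rfin.1.1, sel.1 :: w.1)

-- ===== PRECONDITION & SPEC =====
-- profit of the itinerary 'path' started at time t0: its revenues (each city at its time)
-- minus the travel costs of its consecutive moves — plain zips and sums, no recursion
def pvRouteProfit (revenue travel_cost : List (List Int)) (t0 : Nat) (path : List Nat) : Int :=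
  ((path.zip (List.range' t0 path.length)).map (fun p => pvGet2 revenue p.1 p.2)).sum
  - ((path.zip path.tail).map (fun p => pvGet2 travel_cost p.1 p.2)).sum

-- Exactly the inputs on which the Python A returns an (int, list of int) pair: the asserts pass,
-- every accessed index exists, and from every city and time some itinerary to the end earns more
-- than the -99 sentinel (otherwise A leaves a None gain in that cell and later raises TypeError,
-- or returns None for a single city).
def Pre_max_profit_route (revenue : List (List Int)) (travel_cost : List (List Int)) : Prop :=
  revenue.length = travel_cost.length ∧
  (∀ r ∈ travel_cost, r.length = travel_cost.length) ∧
  0 < revenue.length ∧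
  0 < (revenue.headD []).length ∧
  (∀ r ∈ revenue, (revenue.headD []).length ≤ r.length) ∧
  (∀ c ∈ List.range revenue.length, ∀ k ∈ List.range ((revenue.headD []).length - 1),
     ∃ ds ∈ (List.replicate (k+1) (List.range revenue.length)).sections,
       -99 < pvRouteProfit revenue travel_cost ((revenue.headD []).length - 1 - (k+1)) (c :: ds))

instance (revenue : List (List Int)) (travel_cost : List (List Int)) :
    Decidable (Pre_max_profit_route revenue travel_cost) := by
  unfold Pre_max_profit_route; infer_instance

def pvWitness_max_profit_route : List (List Int) × List (List Int) :=
  ([[1, 2], [3, 4]], [[0, 5], [5, 0]])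

def Spec_max_profit_route (revenue : List (List Int)) (travel_cost : List (List Int)) (out : Int × List Int) : Prop := out = max_profit_route_alt revenue travel_cost
instance (revenue : List (List Int)) (travel_cost : List (List Int)) (out : Int × List Int) : Decidable (Spec_max_profit_route revenue travel_cost out) := by unfold Spec_max_profit_route; infer_instance

-- ===== CLAIM (what is proved, stated in full; the proofs are below) =====
def Claim_equal_max_profit_route : Prop := ∀ (revenue : List (List Int)) (travel_cost : List (List Int)), Dom_max_profit_route revenue travel_cost → Pre_max_profit_route revenue travel_cost → Spec_max_profit_route revenue travel_cost (max_profit_route revenue travel_cost)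

-- ===== LEMMAS AND PROOFS =====

-- pure (memo-free) value of best(c, num_times-1-k): the fixpoint both programs compute
def pvStepP (revenue travel_cost : List (List Int)) (prevG : Nat → Int) (t c : Nat)
    (st : Int × Option Int) (d : Nat) : Int × Option Int :=
  let g := pvGet2 revenue c t + prevG d - pvGet2 travel_cost c d
  if g > st.1 then (g, some (d : Int)) else st

def pvBestP (revenue travel_cost : List (List Int)) : Nat → Nat → Int × Option Int
  | 0, c => (pvGet2 revenue c ((revenue.headD []).length - 1), none)
  | k+1, c =>
    (List.range revenue.length).foldl
      (pvStepP revenue travel_cost (fun d => (pvBestP revenue travel_cost k d).1)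
        ((revenue.headD []).length - 1 - (k+1)) c)
      ((-99 : Int), (none : Option Int))

def pvCandP (revenue travel_cost : List (List Int)) (prevG : Nat → Int) (t c d : Nat) : Int :=
  pvGet2 revenue c t + prevG d - pvGet2 travel_cost c d

-- memo invariant: every stored entry is the pure value at its key
def pvGood (revenue travel_cost : List (List Int))
    (m : PySem.Dict (Int × Int) (Int × Option Int)) : Prop :=
  ∀ p v, m.get? p = some v → ∃ (k c : Nat),
    p = ((c : Int), ((revenue.headD []).length : Int) - 1 - (k : Int)) ∧
    v = pvBestP revenue travel_cost k c

lemma pvGood_empty (revenue travel_cost : List (List Int)) :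
    pvGood revenue travel_cost PySem.Dict.empty := by
  intro p v h
  simp [PySem.Dict.get?_empty] at h

lemma pvGood_lookup (revenue travel_cost : List (List Int))
    (m : PySem.Dict (Int × Int) (Int × Option Int)) (hm : pvGood revenue travel_cost m)
    (k c : Nat) (v : Int × Option Int)
    (h : m.get? ((c : Int), ((revenue.headD []).length : Int) - 1 - (k : Nat)) = some v) :
    v = pvBestP revenue travel_cost k c := by
  obtain ⟨k', c', hp, hv⟩ := hm _ _ h
  have hc : (c' : Int) = (c : Int) := congrArg Prod.fst hp.symm
  have ht : ((revenue.headD []).length : Int) - 1 - (k' : Int)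
      = ((revenue.headD []).length : Int) - 1 - (k : Int) := congrArg Prod.snd hp.symm
  have hc' : c' = c := by exact_mod_cast hc
  have hk' : k' = k := by omega
  rw [hv, hc', hk']

lemma pvGood_insert (revenue travel_cost : List (List Int))
    (m : PySem.Dict (Int × Int) (Int × Option Int)) (hm : pvGood revenue travel_cost m)
    (k c : Nat) :
    pvGood revenue travel_cost
      (m.insert ((c : Int), ((revenue.headD []).length : Int) - 1 - (k : Nat))
        (pvBestP revenue travel_cost k c)) := by
  intro p v h
  rw [PySem.Dict.get?_insert] at h
  split at h
  · exact ⟨k, c, by assumption, (Option.some.inj h).symm⟩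
  · exact hm p v h

-- the 'for d' scan of Source B computes the pure fold and keeps the memo good, assuming the
-- recursive calls at level k do (the induction hypothesis of pv_bestMemoB_spec)
lemma pv_scanB_spec (revenue travel_cost : List (List Int)) (k : Nat)
    (IH : ∀ (d : Nat) m, pvGood revenue travel_cost m →
      (pvBestMemoB revenue travel_cost revenue.length ((revenue.headD []).length) k (d : Int) m).1
        = pvBestP revenue travel_cost k d
      ∧ pvGood revenue travel_cost
          (pvBestMemoB revenue travel_cost revenue.length ((revenue.headD []).length) k (d : Int) m).2) :
    ∀ (ds : List Nat) (c : Nat) st m, pvGood revenue travel_cost m →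
      (ds.foldl
          (fun (acc : (Int × Option Int) × PySem.Dict (Int × Int) (Int × Option Int)) (d : Nat) =>
            let s := pvBestMemoB revenue travel_cost revenue.length ((revenue.headD []).length)
              k (d : Int) acc.2
            let g := pvGet2 revenue ((c : Int)).toNat ((revenue.headD []).length - 1 - (k + 1))
                     + s.1.1 - pvGet2 travel_cost ((c : Int)).toNat d
            if g > acc.1.1 then ((g, some (d : Int)), s.2) else (acc.1, s.2))
          (st, m)).1
        = ds.foldl (pvStepP revenue travel_cost (fun d => (pvBestP revenue travel_cost k d).1)
            ((revenue.headD []).length - 1 - (k+1)) c) st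
      ∧ pvGood revenue travel_cost
          (ds.foldl
            (fun (acc : (Int × Option Int) × PySem.Dict (Int × Int) (Int × Option Int)) (d : Nat) =>
              let s := pvBestMemoB revenue travel_cost revenue.length ((revenue.headD []).length)
                k (d : Int) acc.2
              let g := pvGet2 revenue ((c : Int)).toNat ((revenue.headD []).length - 1 - (k + 1))
                       + s.1.1 - pvGet2 travel_cost ((c : Int)).toNat d
              if g > acc.1.1 then ((g, some (d : Int)), s.2) else (acc.1, s.2))
            (st, m)).2 := by
  intro ds
  induction ds with
  | nil => intro c st m hm; exact ⟨rfl, hm⟩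
  | cons d ds ih =>
    intro c st m hm
    obtain ⟨h1, h2⟩ := IH d m hm
    simp only [List.foldl_cons, Int.toNat_natCast, h1]
    by_cases hc : pvGet2 revenue c ((revenue.headD []).length - 1 - (k + 1))
        + (pvBestP revenue travel_cost k d).1 - pvGet2 travel_cost c d > st.1
    · rw [if_pos hc]
      have := ih c ((pvGet2 revenue c ((revenue.headD []).length - 1 - (k + 1))
          + (pvBestP revenue travel_cost k d).1 - pvGet2 travel_cost c d), some (d : Int))
        (pvBestMemoB revenue travel_cost revenue.length ((revenue.headD []).length) k (d : Int) m).2 h2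
      rw [show pvStepP revenue travel_cost (fun d => (pvBestP revenue travel_cost k d).1)
            ((revenue.headD []).length - 1 - (k+1)) c st d
          = ((pvGet2 revenue c ((revenue.headD []).length - 1 - (k + 1))
              + (pvBestP revenue travel_cost k d).1 - pvGet2 travel_cost c d), some (d : Int))
        from by simp only [pvStepP]; rw [if_pos hc]]
      exact this
    · rw [if_neg hc]
      have := ih c st
        (pvBestMemoB revenue travel_cost revenue.length ((revenue.headD []).length) k (d : Int) m).2 h2
      rw [show pvStepP revenue travel_cost (fun d => (pvBestP revenue travel_cost k d).1)
            ((revenue.headD []).length - 1 - (k+1)) c st d = st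
        from by simp only [pvStepP]; rw [if_neg hc]]
      exact this

-- correctness of the memoized recursion: with a good memo it returns the pure value and
-- leaves the memo good
lemma pv_bestMemoB_spec (revenue travel_cost : List (List Int)) :
    ∀ (k c : Nat) m, pvGood revenue travel_cost m →
      (pvBestMemoB revenue travel_cost revenue.length ((revenue.headD []).length) k (c : Int) m).1
        = pvBestP revenue travel_cost k c
      ∧ pvGood revenue travel_cost
          (pvBestMemoB revenue travel_cost revenue.length ((revenue.headD []).length) k (c : Int) m).2 := by
  intro k
  induction k with
  | zero =>
    intro c m hm
    rw [pvBestMemoB]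
    cases hget : m.get? ((c : Int), ((revenue.headD []).length : Int) - 1 - ((0 : Nat) : Int)) with
    | some v =>
      dsimp only
      refine ⟨(pvGood_lookup revenue travel_cost m hm 0 c v (by exact_mod_cast hget)).symm ▸ rfl, hm⟩
    | none =>
      dsimp only
      refine ⟨by simp [pvBestP, Int.toNat_natCast], ?_⟩
      have := pvGood_insert revenue travel_cost m hm 0 c
      simpa [pvBestP, Int.toNat_natCast] using this
  | succ k ih =>
    intro c m hm
    rw [pvBestMemoB]
    cases hget : m.get? ((c : Int), ((revenue.headD []).length : Int) - 1 - ((Nat.succ k : Nat) : Int)) with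
    | some v =>
      dsimp only
      refine ⟨(pvGood_lookup revenue travel_cost m hm (Nat.succ k) c v hget).symm ▸ rfl, hm⟩
    | none =>
      dsimp only
      obtain ⟨h1, h2⟩ := pv_scanB_spec revenue travel_cost k ih
        (List.range revenue.length) c ((-99 : Int), (none : Option Int)) m hm
      have hpure : ((List.range revenue.length).foldl
          (fun (acc : (Int × Option Int) × PySem.Dict (Int × Int) (Int × Option Int)) (d : Nat) =>
            let s := pvBestMemoB revenue travel_cost revenue.length ((revenue.headD []).length)
              k (d : Int) acc.2
            let g := pvGet2 revenue ((c : Int)).toNat ((revenue.headD []).length - 1 - (k + 1))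
                     + s.1.1 - pvGet2 travel_cost ((c : Int)).toNat d
            if g > acc.1.1 then ((g, some (d : Int)), s.2) else (acc.1, s.2))
          (((-99 : Int), (none : Option Int)), m)).1 = pvBestP revenue travel_cost (k+1) c := by
        rw [h1]; rfl
      refine ⟨hpure, ?_⟩
      rw [hpure]
      exact pvGood_insert revenue travel_cost _ h2 (k+1) c

-- sync relation between A's inner-fold state and the pure fold state
def pvSyncP (n : Nat) (stA : Int × (Option Int × Option Int)) (stP : Int × Option Int) : Prop :=
  stA.1 = stP.1 ∧
  ((stA = (-99, (none, none)) ∧ stP.2 = none) ∨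
   ∃ d : Nat, d < n ∧ stA.2 = (some (d : Int), some stA.1) ∧ stP.2 = some (d : Int))

lemma pv_fold_syncP (revenue travel_cost : List (List Int))
    (nxt : List (Option Int × Option Int)) (prevG : Nat → Int) (t c n : Nat)
    (ds : List Nat) (hd : ∀ d ∈ ds, d < n)
    (hg : ∀ d ∈ ds, ((nxt.getD d ((none : Option Int), (none : Option Int))).2.getD 0) = prevG d)
    (stA : Int × (Option Int × Option Int)) (stP : Int × Option Int)
    (hs : pvSyncP n stA stP) :
    pvSyncP n (ds.foldl (pvStepA revenue travel_cost nxt t c) stA)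
      (ds.foldl (pvStepP revenue travel_cost prevG t c) stP)
    ∧ (ds.foldl (pvStepP revenue travel_cost prevG t c) stP).1
      = ds.foldl (fun m d => max m (pvCandP revenue travel_cost prevG t c d)) stP.1 := by
  induction ds generalizing stA stP with
  | nil => exact ⟨hs, rfl⟩
  | cons d ds ih =>
    have hdn : d < n := hd d (by simp)
    have hgd := hg d (by simp)
    have h1 := hs.1
    simp only [List.foldl_cons]
    by_cases hcmp : pvCandP revenue travel_cost prevG t c d > stP.1
    · have eA : pvStepA revenue travel_cost nxt t c stA d
          = (pvCandP revenue travel_cost prevG t c d,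
             (some (d : Int), some (pvCandP revenue travel_cost prevG t c d))) := by
        simp only [pvStepA, hgd]
        rw [show pvGet2 revenue c t + prevG d - pvGet2 travel_cost c d
              = pvCandP revenue travel_cost prevG t c d from rfl]
        rw [if_pos (by rw [h1]; exact hcmp)]
      have eP : pvStepP revenue travel_cost prevG t c stP d
          = (pvCandP revenue travel_cost prevG t c d, some (d : Int)) := by
        simp only [pvStepP]
        rw [show pvGet2 revenue c t + prevG d - pvGet2 travel_cost c d
              = pvCandP revenue travel_cost prevG t c d from rfl]
        rw [if_pos hcmp]
      rw [eA, eP]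
      have hnext := ih (fun x hx => hd x (by simp [hx])) (fun x hx => hg x (by simp [hx]))
        (pvCandP revenue travel_cost prevG t c d,
          (some (d : Int), some (pvCandP revenue travel_cost prevG t c d)))
        (pvCandP revenue travel_cost prevG t c d, some (d : Int))
        ⟨rfl, Or.inr ⟨d, hdn, rfl, rfl⟩⟩
      refine ⟨hnext.1, ?_⟩
      rw [hnext.2]
      congr 1
      exact (max_eq_right hcmp.le).symm
    · have eA : pvStepA revenue travel_cost nxt t c stA d = stA := by
        simp only [pvStepA, hgd]
        rw [show pvGet2 revenue c t + prevG d - pvGet2 travel_cost c d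
              = pvCandP revenue travel_cost prevG t c d from rfl]
        rw [if_neg (by rw [h1]; exact hcmp)]
      have eP : pvStepP revenue travel_cost prevG t c stP d = stP := by
        simp only [pvStepP]
        rw [show pvGet2 revenue c t + prevG d - pvGet2 travel_cost c d
              = pvCandP revenue travel_cost prevG t c d from rfl]
        rw [if_neg hcmp]
      rw [eA, eP]
      have hnext := ih (fun x hx => hd x (by simp [hx])) (fun x hx => hg x (by simp [hx])) stA stP hs
      refine ⟨hnext.1, ?_⟩
      rw [hnext.2]
      congr 1
      exact (max_eq_left (not_lt.mp hcmp)).symm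

-- the pure fold's gain component is the running strict-> maximum
lemma pv_foldP_fst (revenue travel_cost : List (List Int)) (prevG : Nat → Int)
    (t c : Nat) (ds : List Nat) :
    ∀ st : Int × Option Int, (ds.foldl (pvStepP revenue travel_cost prevG t c) st).1
      = ds.foldl (fun m d => max m (pvCandP revenue travel_cost prevG t c d)) st.1 := by
  induction ds with
  | nil => intro st; rfl
  | cons d ds ih =>
    intro st
    simp only [List.foldl_cons]
    by_cases hcmp : pvCandP revenue travel_cost prevG t c d > st.1
    · have eP : pvStepP revenue travel_cost prevG t c st d
          = (pvCandP revenue travel_cost prevG t c d, some (d : Int)) := by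
        simp only [pvStepP]
        rw [show pvGet2 revenue c t + prevG d - pvGet2 travel_cost c d
              = pvCandP revenue travel_cost prevG t c d from rfl]
        rw [if_pos hcmp]
      rw [eP, ih]
      congr 1
      exact (max_eq_right hcmp.le).symm
    · have eP : pvStepP revenue travel_cost prevG t c st d = st := by
        simp only [pvStepP]
        rw [show pvGet2 revenue c t + prevG d - pvGet2 travel_cost c d
              = pvCandP revenue travel_cost prevG t c d from rfl]
        rw [if_neg hcmp]
      rw [eP, ih]
      congr 1
      exact (max_eq_left (not_lt.mp hcmp)).symm

lemma pv_profit_cons (revenue travel_cost : List (List Int)) (t0 : Nat) (c d : Nat) (ds : List Nat) :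
    pvRouteProfit revenue travel_cost t0 (c :: d :: ds)
      = pvGet2 revenue c t0 - pvGet2 travel_cost c d
        + pvRouteProfit revenue travel_cost (t0 + 1) (d :: ds) := by
  simp only [pvRouteProfit, List.length_cons, List.range'_succ, List.zip_cons_cons,
    List.tail_cons, List.map_cons, List.sum_cons]
  ring

-- the pure gain dominates the profit of every itinerary
lemma pv_bestP_ge (revenue travel_cost : List (List Int)) :
    ∀ k, k ≤ (revenue.headD []).length - 1 → ∀ c, c < revenue.length →
      ∀ ds ∈ (List.replicate k (List.range revenue.length)).sections,
        pvRouteProfit revenue travel_cost ((revenue.headD []).length - 1 - k) (c :: ds)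
          ≤ (pvBestP revenue travel_cost k c).1 := by
  intro k
  induction k with
  | zero =>
    intro _ c hc ds hds
    have hds' : ds = [] := by
      rw [List.mem_sections] at hds
      simpa using hds
    subst hds'
    simp [pvBestP, pvRouteProfit, List.range'_succ]
  | succ k ih =>
    intro hk c hc ds hds
    rw [List.mem_sections, List.replicate_succ] at hds
    rcases ds with _ | ⟨d, ds'⟩
    · exact absurd hds (by simp)
    rw [List.forall₂_cons] at hds
    obtain ⟨hd, hds'⟩ := hds
    have hdn : d < revenue.length := List.mem_range.mp hd
    have hih := ih (by omega) d hdn ds' (List.mem_sections.mpr hds')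
    have hBfold : (pvBestP revenue travel_cost (k+1) c).1
        = (List.range revenue.length).foldl
            (fun m x => max m (pvCandP revenue travel_cost
              (fun d => (pvBestP revenue travel_cost k d).1)
              ((revenue.headD []).length - 1 - (k+1)) c x)) (-99) := by
      rw [show pvBestP revenue travel_cost (k+1) c
            = (List.range revenue.length).foldl
                (pvStepP revenue travel_cost (fun d => (pvBestP revenue travel_cost k d).1)
                  ((revenue.headD []).length - 1 - (k+1)) c)
                ((-99 : Int), (none : Option Int)) from rfl]
      exact pv_foldP_fst revenue travel_cost _ _ _ _ _
    have hle := (PySem.List.le_foldl_max_int (List.range revenue.length)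
      (pvCandP revenue travel_cost (fun d => (pvBestP revenue travel_cost k d).1)
        ((revenue.headD []).length - 1 - (k+1)) c) (-99)).2 d hd
    rw [hBfold]
    refine le_trans ?_ hle
    rw [pv_profit_cons]
    have ht : (revenue.headD []).length - 1 - (k+1) + 1 = (revenue.headD []).length - 1 - k := by
      omega
    rw [ht]
    simp only [pvCandP]
    omega

-- A's DP cells carry exactly the pure values (pointer, gain); for k ≥ 1 the pointer is a
-- real city index (the -99 sentinel is beaten, by Pre_'s reachability clause)
lemma pv_cellA (revenue travel_cost : List (List Int))
    (hPre : Pre_max_profit_route revenue travel_cost) :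
    ∀ k, k ≤ (revenue.headD []).length - 1 → ∀ c, c < revenue.length →
      (pvRowsA revenue travel_cost k).getD c ((none : Option Int), (none : Option Int))
          = ((pvBestP revenue travel_cost k c).2, some (pvBestP revenue travel_cost k c).1)
      ∧ (1 ≤ k → ∃ d : Nat, d < revenue.length
          ∧ (pvBestP revenue travel_cost k c).2 = some (d : Int)) := by
  obtain ⟨hlen, hsq, hn, hT, hrows, hbell⟩ := hPre
  intro k
  induction k with
  | zero =>
    intro _ c hc
    refine ⟨?_, fun h => absurd h (by omega)⟩
    simp only [pvRowsA, PySem.List.getD_map_range _ _ _ _ hc, pvBestP]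
  | succ k ih =>
    intro hk c hc
    have hk' : k ≤ (revenue.headD []).length - 1 := by omega
    have ihk := fun d hd => ih hk' d hd
    have hA : (pvRowsA revenue travel_cost (k+1)).getD c ((none : Option Int), (none : Option Int))
        = (pvInnerA revenue travel_cost (pvRowsA revenue travel_cost k)
            ((revenue.headD []).length - 1 - (k+1)) c).2 := by
      simp only [pvRowsA, PySem.List.getD_map_range _ _ _ _ hc]
    have hsync := pv_fold_syncP revenue travel_cost (pvRowsA revenue travel_cost k)
      (fun d => (pvBestP revenue travel_cost k d).1)
      ((revenue.headD []).length - 1 - (k+1)) c revenue.length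
      (List.range revenue.length) (fun d hd => List.mem_range.mp hd)
      (fun d hd => by rw [(ihk d (List.mem_range.mp hd)).1]; rfl)
      (-99, (none, none)) (-99, none) ⟨rfl, Or.inl ⟨rfl, rfl⟩⟩
    have hPdef : pvBestP revenue travel_cost (k+1) c
        = (List.range revenue.length).foldl
            (pvStepP revenue travel_cost (fun d => (pvBestP revenue travel_cost k d).1)
              ((revenue.headD []).length - 1 - (k+1)) c)
            ((-99 : Int), (none : Option Int)) := rfl
    have hsyncrel : pvSyncP revenue.length
        (pvInnerA revenue travel_cost (pvRowsA revenue travel_cost k)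
          ((revenue.headD []).length - 1 - (k+1)) c)
        (pvBestP revenue travel_cost (k+1) c) := by
      rw [hPdef]; exact hsync.1
    obtain ⟨ds, hds, hprof⟩ := hbell c (List.mem_range.mpr hc) k (List.mem_range.mpr (by omega))
    have hge := pv_bestP_ge revenue travel_cost (k+1) hk c hc ds hds
    have hgt : -99 < (pvBestP revenue travel_cost (k+1) c).1 := lt_of_lt_of_le hprof hge
    have h1 := hsyncrel.1
    rcases hsyncrel.2 with ⟨hinit, _⟩ | ⟨dstar, hdn, hA2, hP2⟩
    · exfalso
      have : (-99 : Int) = (pvBestP revenue travel_cost (k+1) c).1 := by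
        rw [hinit] at h1; exact h1
      omega
    · refine ⟨?_, fun _ => ⟨dstar, hdn, hP2⟩⟩
      rw [hA, hA2, hP2, h1]

-- B's pointer walk follows exactly A's construct_path walk, keeping the memo good
lemma pv_walkB_spec (revenue travel_cost : List (List Int))
    (hPre : Pre_max_profit_route revenue travel_cost) :
    ∀ f t (c : Nat) m, c < revenue.length → t + f = (revenue.headD []).length - 1 →
      pvGood revenue travel_cost m →
      (pvWalkB revenue travel_cost revenue.length ((revenue.headD []).length) f t (c : Int) m).1
        = pvWalkA revenue travel_cost ((revenue.headD []).length) (c : Int) t f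
      ∧ pvGood revenue travel_cost
          (pvWalkB revenue travel_cost revenue.length ((revenue.headD []).length) f t (c : Int) m).2 := by
  intro f
  induction f with
  | zero =>
    intro t c m _ _ hm
    exact ⟨rfl, hm⟩
  | succ f ihf =>
    intro t c m hc ht hm
    have hk : (revenue.headD []).length - 1 - t = f + 1 := by omega
    obtain ⟨h1, h2⟩ := pv_bestMemoB_spec revenue travel_cost
      ((revenue.headD []).length - 1 - t) c m hm
    obtain ⟨ha, hb⟩ := pv_cellA revenue travel_cost hPre (f+1) (by omega) c hc
    obtain ⟨d, hdn, hd⟩ := hb (by omega)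
    have hnxB : (pvBestMemoB revenue travel_cost revenue.length ((revenue.headD []).length)
          ((revenue.headD []).length - 1 - t) (c : Int) m).1.2.getD 0 = (d : Int) := by
      rw [h1, hk, hd]; rfl
    have hnxA : ((pvRowsA revenue travel_cost ((revenue.headD []).length - 1 - t)).getD
          ((c : Int)).toNat ((none : Option Int), (none : Option Int))).1.getD 0 = (d : Int) := by
      rw [Int.toNat_natCast, hk, ha, hd]; rfl
    obtain ⟨hrec1, hrec2⟩ := ihf (t+1) d _ hdn (by omega) h2
    simp only [pvWalkB, pvWalkA]
    rw [hnxB, hnxA]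
    exact ⟨by rw [hrec1], hrec2⟩

-- the start-city selection: A's first-best argmax over indices tracks B's memo-threaded loop
lemma pv_selB (revenue travel_cost : List (List Int))
    (hPre : Pre_max_profit_route revenue travel_cost) :
    ∀ (ks : List Nat) (i0 : Nat), i0 < revenue.length → (∀ j ∈ ks, j < revenue.length) →
      ∀ m, pvGood revenue travel_cost m →
      ∃ i1, i1 < revenue.length ∧
        ((ks.map (fun (j : Nat) => (j : Int))).foldl (fun i j =>
            if (((pvRowsA revenue travel_cost ((revenue.headD []).length - 1)).getD j.toNat
                  ((none : Option Int), (none : Option Int))).2.getD 0)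
               > (((pvRowsA revenue travel_cost ((revenue.headD []).length - 1)).getD i.toNat
                  ((none : Option Int), (none : Option Int))).2.getD 0)
            then j else i) (i0 : Int)) = (i1 : Int) ∧
        ((ks.map (fun (j : Nat) => (j : Int))).foldl
            (fun (acc : Int × PySem.Dict (Int × Int) (Int × Option Int)) c =>
              let rc := pvBestMemoB revenue travel_cost revenue.length
                ((revenue.headD []).length) ((revenue.headD []).length - 1) c acc.2
              let rs := pvBestMemoB revenue travel_cost revenue.length
                ((revenue.headD []).length) ((revenue.headD []).length - 1) acc.1 rc.2
              if rc.1.1 > rs.1.1 then (c, rs.2) else (acc.1, rs.2))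
            ((i0 : Int), m)).1 = (i1 : Int) ∧
        pvGood revenue travel_cost
          ((ks.map (fun (j : Nat) => (j : Int))).foldl
            (fun (acc : Int × PySem.Dict (Int × Int) (Int × Option Int)) c =>
              let rc := pvBestMemoB revenue travel_cost revenue.length
                ((revenue.headD []).length) ((revenue.headD []).length - 1) c acc.2
              let rs := pvBestMemoB revenue travel_cost revenue.length
                ((revenue.headD []).length) ((revenue.headD []).length - 1) acc.1 rc.2
              if rc.1.1 > rs.1.1 then (c, rs.2) else (acc.1, rs.2))
            ((i0 : Int), m)).2 := by
  intro ks
  induction ks with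
  | nil => exact fun i0 hi0 _ m hm => ⟨i0, hi0, rfl, rfl, hm⟩
  | cons j ks ih =>
    intro i0 hi0 hks m hm
    have hjn : j < revenue.length := hks j (by simp)
    obtain ⟨hc1, hc2⟩ := pv_bestMemoB_spec revenue travel_cost
      ((revenue.headD []).length - 1) j m hm
    obtain ⟨hs1, hs2⟩ := pv_bestMemoB_spec revenue travel_cost
      ((revenue.headD []).length - 1) i0 _ hc2
    have hgA : ∀ x : Nat, x < revenue.length →
        (((pvRowsA revenue travel_cost ((revenue.headD []).length - 1)).getD ((x : Int)).toNat
          ((none : Option Int), (none : Option Int))).2.getD 0)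
        = (pvBestP revenue travel_cost ((revenue.headD []).length - 1) x).1 := by
      intro x hx
      rw [Int.toNat_natCast,
        (pv_cellA revenue travel_cost hPre ((revenue.headD []).length - 1) le_rfl x hx).1]
      rfl
    simp only [List.map_cons, List.foldl_cons]
    simp only [hgA j hjn, hgA i0 hi0, hc1, hs1]
    by_cases hcmp : (pvBestP revenue travel_cost ((revenue.headD []).length - 1) j).1
        > (pvBestP revenue travel_cost ((revenue.headD []).length - 1) i0).1
    · simp only [hcmp, if_true]
      exact ih j hjn (fun x hx => hks x (by simp [hx])) _ hs2
    · simp only [hcmp, if_false]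
      exact ih i0 hi0 (fun x hx => hks x (by simp [hx])) _ hs2

lemma pv_pyRange_one_list (n : Nat) :
    PySem.List.pyRange 1 (n : Int) 1
      = ((List.range (n - 1)).map (fun k => k + 1)).map (fun (k : Nat) => (k : Int)) := by
  rw [PySem.List.pyRange_one]
  have : ((n : Int) - 1).toNat = n - 1 := by omega
  rw [this, List.map_map]
  apply List.map_congr_left
  intro x _
  simp only [Function.comp_apply]
  push_cast
  ring

-- ===== VERDICT (by name: the statement is the Claim_ definition above) =====
theorem max_profit_route_spec : Claim_equal_max_profit_route := by
  intro revenue travel_cost hDom hPre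
  unfold Spec_max_profit_route
  have hn : 0 < revenue.length := hPre.2.2.1
  have hks : ∀ k ∈ (List.range (revenue.length - 1)).map (fun k => k + 1),
      k < revenue.length := by
    intro k hk
    simp only [List.mem_map, List.mem_range] at hk
    obtain ⟨x, hx, rfl⟩ := hk
    omega
  obtain ⟨i1, hi1, EA, EB, hGood⟩ := pv_selB revenue travel_cost hPre
    ((List.range (revenue.length - 1)).map (fun k => k + 1)) 0 hn hks
    PySem.Dict.empty (pvGood_empty revenue travel_cost)
  obtain ⟨W1, W2⟩ := pv_walkB_spec revenue travel_cost hPre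
    ((revenue.headD []).length - 1) 0 i1 _ hi1 (by omega) hGood
  obtain ⟨F1, _⟩ := pv_bestMemoB_spec revenue travel_cost
    ((revenue.headD []).length - 1) i1 _ W2
  have hgA : (((pvRowsA revenue travel_cost ((revenue.headD []).length - 1)).getD
        ((i1 : Int)).toNat ((none : Option Int), (none : Option Int))).2.getD 0)
      = (pvBestP revenue travel_cost ((revenue.headD []).length - 1) i1).1 := by
    rw [Int.toNat_natCast,
      (pv_cellA revenue travel_cost hPre ((revenue.headD []).length - 1) le_rfl i1 hi1).1]
    rfl
  simp only [max_profit_route, max_profit_route_alt]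
  rw [pv_pyRange_one_list revenue.length]
  simp only [Nat.cast_zero] at EA EB W1 F1 hGood W2 ⊢
  try dsimp only at EA EB W1 F1 hgA ⊢
  rw [EA, EB, W1, F1, hgA]
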